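-- pv_equiv track=rewrite | github.com/nicholasedger88/pdf_scraper | app.py | extract_intro_by_word_count
-- ===== SOURCE A (Python) =====
-- def extract_intro_by_word_count(text, word_limit):
--     sentences = text.split('. ')  # Split text by periods to get sentence-like chunks
--     word_count = 0
--     intro_chunk = []
--
--     for sentence in sentences:
--         words_in_sentence = len(sentence.split())  # Count words in the current sentence
--         if word_count + words_in_sentence > word_limit:
--             break  # Stop if adding this sentence would exceed the word limit
--         intro_chunk.append(sentence.strip())  # Add the sentence to the chunk
--         word_count += words_in_sentence
--
--     return '. '.join(intro_chunk) + '.'  # Ensure we end with a period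
-- ===== SOURCE B (Python) =====
-- def extract_intro_by_word_count(text, word_limit):
--     # Phase 1: measure — per-sentence word counts and their running totals.
--     sentences = text.split('. ')
--     prefix_totals = []
--     total = 0
--     for s in sentences:
--         total += len(s.split())
--         prefix_totals.append(total)
--     # Phase 2: select — cutoff k = leading sentences whose running total fits.
--     k = 0
--     while k < len(prefix_totals) and prefix_totals[k] <= word_limit:
--         k += 1
--     return '. '.join(s.strip() for s in sentences[:k]) + '.'
-- ===== Notes on version B (the rewrite author's own statement) =====
-- stated objective: alternative
-- what changed: Replaced A's interleaved accumulate-and-break loop by a measure-then-select decomposition: compute all prefix word totals first, find the cutoff index k by a scan over the totals, then join the first k stripped sentences.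
import Mathlib
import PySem

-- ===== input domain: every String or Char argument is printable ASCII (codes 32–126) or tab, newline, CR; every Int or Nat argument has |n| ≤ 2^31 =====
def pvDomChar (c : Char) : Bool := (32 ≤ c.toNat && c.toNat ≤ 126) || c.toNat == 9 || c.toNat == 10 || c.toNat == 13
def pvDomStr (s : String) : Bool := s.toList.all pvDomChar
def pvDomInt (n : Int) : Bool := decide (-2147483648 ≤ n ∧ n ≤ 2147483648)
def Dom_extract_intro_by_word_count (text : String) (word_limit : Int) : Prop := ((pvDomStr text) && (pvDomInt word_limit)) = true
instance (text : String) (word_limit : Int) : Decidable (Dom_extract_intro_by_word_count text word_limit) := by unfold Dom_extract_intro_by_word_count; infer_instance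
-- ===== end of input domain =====

-- B replaces A's accumulate-and-break loop by a measure-then-select decomposition
-- (prefix word totals first, then a cutoff scan, then join); objective: alternative.

-- ===== PORT A =====
-- text.split(". ") = (PySem.Str.split? text ". ").getD [] — exact, sep nonempty so split? = some.
-- A's for-loop with break: recursion over the sentence list carrying (word_count, intro_chunk).
def pvGoA (limit : Int) : List String → Int → List String → List String
  | [], _, acc => acc
  | s :: rest, wc, acc =>
    let w : Int := ((PySem.Str.split₀ s).length : Int)
    if wc + w > limit then acc
    else pvGoA limit rest (wc + w) (acc ++ [PySem.Str.strip s])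

def extract_intro_by_word_count (text : String) (word_limit : Int) : String :=
  PySem.Str.join ". " (pvGoA word_limit ((PySem.Str.split? text ". ").getD []) 0 []) ++ "."

-- ===== PORT B =====
-- Phase 1: running word totals per sentence.
def pvPrefixTotals (t : Int) : List String → List Int
  | [] => []
  | s :: rest =>
    let t' := t + ((PySem.Str.split₀ s).length : Int)
    t' :: pvPrefixTotals t' rest

-- Phase 2: the while-loop counting leading totals ≤ limit.
def pvCutoff (limit : Int) : List Int → Nat
  | [] => 0
  | p :: rest => if p ≤ limit then 1 + pvCutoff limit rest else 0

def extract_intro_by_word_count_alt (text : String) (word_limit : Int) : String :=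
  let sentences := (PySem.Str.split? text ". ").getD []
  let k := pvCutoff word_limit (pvPrefixTotals 0 sentences)
  PySem.Str.join ". " ((sentences.take k).map PySem.Str.strip) ++ "."

-- ===== PRECONDITION & SPEC =====
def Spec_extract_intro_by_word_count (text : String) (word_limit : Int) (out : String) : Prop := out = extract_intro_by_word_count_alt text word_limit
instance (text : String) (word_limit : Int) (out : String) : Decidable (Spec_extract_intro_by_word_count text word_limit out) := by unfold Spec_extract_intro_by_word_count; infer_instance

-- ===== CLAIM (what is proved, stated in full; the proofs are below) =====
def Claim_equal_extract_intro_by_word_count : Prop := ∀ (text : String) (word_limit : Int), Dom_extract_intro_by_word_count text word_limit → Spec_extract_intro_by_word_count text word_limit (extract_intro_by_word_count text word_limit)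

-- ===== LEMMAS AND PROOFS =====
theorem pvGoA_eq_take (limit : Int) (ss : List String) : ∀ (wc : Int) (acc : List String),
    pvGoA limit ss wc acc = acc ++ (ss.take (pvCutoff limit (pvPrefixTotals wc ss))).map PySem.Str.strip := by
  induction ss with
  | nil => intro wc acc; simp [pvGoA, pvPrefixTotals, pvCutoff]
  | cons s rest ih =>
    intro wc acc
    simp only [pvGoA, pvPrefixTotals, pvCutoff]
    by_cases h : wc + ((PySem.Str.split₀ s).length : Int) > limit
    · rw [if_pos h, if_neg (by omega)]
      simp
    · rw [if_neg h, if_pos (by omega), ih]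
      simp [Nat.add_comm 1, List.take_succ_cons]

-- ===== VERDICT (by name: the statement is the Claim_ definition above) =====
theorem extract_intro_by_word_count_spec : Claim_equal_extract_intro_by_word_count := by
  intro text word_limit _
  unfold Spec_extract_intro_by_word_count extract_intro_by_word_count extract_intro_by_word_count_alt
  rw [pvGoA_eq_take]
  simp
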